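-- pv_equiv track=rewrite | github.com/ahmed91abbas/advent-of-code | 2021/day04/1.py | get_bingo
-- ===== SOURCE A (Python) =====
-- def get_bingo(grids, numbers):
--     marked = list()
--     for n in numbers:
--         marked.append(n)
--         for grid in grids:
--             for rc in grid:
--                 if all(x in marked for x in rc):
--                     return n, marked, grid
-- ===== SOURCE B (Python) =====
-- def get_bingo(grids, numbers):
--     if not numbers:
--         return None
--     idx = {}
--     for i, n in enumerate(numbers):
--         if n not in idx:
--             idx[n] = i
--     inf = len(numbers)  # acts as infinity: every real draw index is smaller
--
--     def line_step(rc):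
--         s = 0
--         for x in rc:
--             j = idx.get(x, inf)
--             if j > s:
--                 s = j
--         return s
--
--     best = inf
--     best_grid = None
--     for grid in grids:
--         g = inf
--         for rc in grid:
--             t = line_step(rc)
--             if t < g:
--                 g = t
--         if g < best:
--             best = g
--             best_grid = grid
--     if best >= inf:
--         return None
--     return numbers[best], numbers[:best + 1], best_grid
-- ===== Notes on version B (the rewrite author's own statement) =====
-- stated objective: faster
-- what changed: Instead of replaying the draws one by one and rescanning every grid line against the growing 'marked' list (membership tested by list scan), B builds a hash map from each number to its first draw index in one pass, computes each line's completion step as the max of its cells' indices, takes the min over lines and grids (first grid on ties, matching A's scan order), and returns (numbers[step], numbers[:step+1], grid) directly.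
import Mathlib
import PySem

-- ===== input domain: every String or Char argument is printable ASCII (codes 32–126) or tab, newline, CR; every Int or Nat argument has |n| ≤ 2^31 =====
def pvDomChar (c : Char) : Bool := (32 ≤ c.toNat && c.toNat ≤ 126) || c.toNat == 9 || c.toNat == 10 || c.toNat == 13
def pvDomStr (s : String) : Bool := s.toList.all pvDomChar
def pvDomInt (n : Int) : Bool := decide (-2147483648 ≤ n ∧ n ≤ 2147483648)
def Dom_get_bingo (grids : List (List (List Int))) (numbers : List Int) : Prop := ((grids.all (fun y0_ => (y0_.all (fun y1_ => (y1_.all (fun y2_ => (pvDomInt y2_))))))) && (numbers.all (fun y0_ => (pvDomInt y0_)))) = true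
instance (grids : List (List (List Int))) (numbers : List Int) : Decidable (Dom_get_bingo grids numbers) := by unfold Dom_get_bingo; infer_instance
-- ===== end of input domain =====

-- B replaces A's replay of the draws (rescanning every line against the growing marked list)
-- by a first-draw-index map and a single min/max pass over the grids; measurably faster.

-- ===== PORT A =====
def pvLineDone (marked rc : List Int) : Bool := rc.all (fun x => marked.contains x)

def pvScanA (grids : List (List (List Int))) (marked : List Int) : Option (List (List Int)) :=
  match grids with
  | [] => none
  | g :: gs => if g.any (fun rc => pvLineDone marked rc) then some g else pvScanA gs marked

def pvLoopA (grids : List (List (List Int))) (marked : List Int) :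
    List Int → Option (Int × List Int × List (List Int))
  | [] => none
  | n :: ns =>
    let m := marked ++ [n]
    match pvScanA grids m with
    | some g => some (n, m, g)
    | none => pvLoopA grids m ns

def get_bingo (grids : List (List (List Int))) (numbers : List Int) :
    Option (Int × List Int × List (List Int)) :=
  pvLoopA grids [] numbers

-- ===== PORT B =====
-- idx = {} ; for i, n in enumerate(numbers): if n not in idx: idx[n] = i
def pvBuildIdx (numbers : List Int) : PySem.Dict Int Int :=
  (PySem.List.enumerate numbers).foldl
    (fun d p => if (d.get? p.2).isSome then d else d.insert p.2 p.1) ⟨[]⟩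

def pvLineStep (d : PySem.Dict Int Int) (inf : Int) (rc : List Int) : Int :=
  rc.foldl (fun s x => let j := d.getD x inf; if j > s then j else s) 0

def pvGridStep (d : PySem.Dict Int Int) (inf : Int) (g : List (List Int)) : Int :=
  g.foldl (fun m rc => let t := pvLineStep d inf rc; if t < m then t else m) inf

def pvBestFold (d : PySem.Dict Int Int) (inf : Int) (grids : List (List (List Int))) :
    Int × Option (List (List Int)) :=
  grids.foldl
    (fun (acc : Int × Option (List (List Int))) g =>
      let t := pvGridStep d inf g
      if t < acc.1 then (t, some g) else acc) (inf, none)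

def get_bingo_alt (grids : List (List (List Int))) (numbers : List Int) :
    Option (Int × List Int × List (List Int)) :=
  if numbers.isEmpty then none
  else
    let inf : Int := numbers.length
    let r := pvBestFold (pvBuildIdx numbers) inf grids
    if inf ≤ r.1 then none
    else
      -- best < inf, so numbers[best] exists and best_grid is set; the none branches are unreachable
      match PySem.List.pyGet? numbers r.1, r.2 with
      | some v, some bg => some (v, PySem.List.slice numbers none (some (r.1 + 1)), bg)
      | _, _ => none

-- ===== PRECONDITION & SPEC =====
def Spec_get_bingo (grids : List (List (List Int))) (numbers : List Int) (out : Option (Int × List Int × List (List Int))) : Prop := out = get_bingo_alt grids numbers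
instance (grids : List (List (List Int))) (numbers : List Int) (out : Option (Int × List Int × List (List Int))) : Decidable (Spec_get_bingo grids numbers out) := by unfold Spec_get_bingo; infer_instance

-- ===== CLAIM (what is proved, stated in full; the proofs are below) =====
def Claim_equal_get_bingo : Prop := ∀ (grids : List (List (List Int))) (numbers : List Int), Dom_get_bingo grids numbers → Spec_get_bingo grids numbers (get_bingo grids numbers)

-- ===== LEMMAS AND PROOFS =====

-- A's grid scan is find? of "some line fully marked"
theorem pvScanA_eq_find? (grids : List (List (List Int))) (marked : List Int) :
    pvScanA grids marked = grids.find? (fun g => g.any (fun rc => pvLineDone marked rc)) := by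
  induction grids with
  | nil => rfl
  | cons g gs ih =>
      rw [List.find?_cons]
      cases hany : g.any (fun rc => pvLineDone marked rc) <;> simp [pvScanA, hany, ih]

-- the first-draw-index map: fold invariant
theorem pvBuildIdx_go (l : List Int) : ∀ (i : Int) (d : PySem.Dict Int Int) (x : Int),
    ((PySem.List.enumerate l i).foldl
      (fun d p => if (d.get? p.2).isSome then d else d.insert p.2 p.1) d).get? x =
    match d.get? x with
    | some v => some v
    | none => if x ∈ l then some (i + (l.idxOf x : Int)) else none := by
  induction l with
  | nil =>
      intro i d x
      cases h : d.get? x <;> simp [PySem.List.enumerate, h]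
  | cons a l ih =>
      intro i d x
      have shift : x ≠ a →
          (if x ∈ l then some (i + 1 + (l.idxOf x : Int)) else none) =
          (if x ∈ a :: l then some (i + (((a :: l).idxOf x : Nat) : Int)) else none) := by
        intro hxa
        rw [List.idxOf_cons_ne _ (fun h => hxa h.symm)]
        by_cases hm : x ∈ l
        · rw [if_pos hm, if_pos (List.mem_cons_of_mem a hm)]
          congr 1
          push_cast
          ring
        · rw [if_neg hm, if_neg (by simp [hxa, hm])]
      rw [show PySem.List.enumerate (a :: l) i = (i, a) :: PySem.List.enumerate l (i + 1) from by
        simp [PySem.List.enumerate]]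
      rw [List.foldl_cons]
      by_cases hda : (d.get? a).isSome
      · rw [show (if ((d.get? (i, a).2).isSome) then d else d.insert (i, a).2 (i, a).1) = d from by
          simp [hda]]
        rw [ih (i + 1) d x]
        cases hdx : d.get? x with
        | some v => simp
        | none =>
            have hxa : x ≠ a := by
              intro h; rw [← h, hdx] at hda; simp at hda
            simpa using shift hxa
      · rw [show (if ((d.get? (i, a).2).isSome) then d else d.insert (i, a).2 (i, a).1)
            = d.insert a i from by simp [hda]]
        rw [ih (i + 1) (d.insert a i) x]
        by_cases hxa : x = a
        · subst hxa
          rw [PySem.Dict.get?_insert_self]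
          have hdn : d.get? x = none := by
            cases h : d.get? x
            · rfl
            · rw [h] at hda; simp at hda
          simp [hdn, List.idxOf_cons_self]
        · rw [PySem.Dict.get?_insert_of_ne _ _ hxa]
          cases hdx : d.get? x with
          | some v => simp
          | none => simpa using shift hxa

-- getD of the map is exactly idxOf (length when absent)
theorem pvBuildIdx_getD (numbers : List Int) (x : Int) :
    (pvBuildIdx numbers).getD x ((numbers.length : Int)) = ((numbers.idxOf x : Nat) : Int) := by
  have h := pvBuildIdx_go numbers 0 ⟨[]⟩ x
  have hemp : (PySem.Dict.mk [] : PySem.Dict Int Int).get? x = none := rfl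
  rw [hemp] at h
  rw [PySem.Dict.getD, pvBuildIdx, h]
  by_cases hm : x ∈ numbers
  · simp [hm]
  · simp [hm]

-- membership in a take-prefix via idxOf
theorem mem_take_iff_idxOf (x : Int) (l : List Int) : ∀ (m : Nat), m ≤ l.length →
    (x ∈ l.take m ↔ l.idxOf x < m) := by
  induction l with
  | nil => intro m h; simp_all
  | cons a l ih =>
      intro m h
      cases m with
      | zero => simp
      | succ m =>
          by_cases hxa : x = a
          · subst hxa; simp [List.idxOf_cons_self]
          · rw [List.take_succ_cons]
            simp only [List.mem_cons, List.idxOf_cons_ne _ (fun h2 => hxa h2.symm)]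
            rw [ih m (by simpa using h)]
            constructor
            · rintro (rfl | h2)
              · exact absurd rfl hxa
              · omega
            · intro h2; exact Or.inr (by omega)

-- the max-fold of pvLineStep
theorem pvLineStep_aux (d : PySem.Dict Int Int) (inf : Int) (rc : List Int) (a c : Int) :
    (rc.foldl (fun s x => let j := d.getD x inf; if j > s then j else s) a ≤ c) ↔
      (a ≤ c ∧ ∀ x ∈ rc, d.getD x inf ≤ c) := by
  induction rc generalizing a with
  | nil => simp
  | cons y ys ih =>
      simp only [List.foldl_cons, List.mem_cons]
      rw [ih]
      constructor
      · rintro ⟨h1, h2⟩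
        refine ⟨?_, ?_⟩
        · split at h1 <;> omega
        · rintro x (rfl | hx)
          · split at h1 <;> omega
          · exact h2 x hx
      · rintro ⟨h1, h2⟩
        refine ⟨?_, fun x hx => h2 x (Or.inr hx)⟩
        have := h2 y (Or.inl rfl)
        split <;> omega

theorem pvLineStep_nonneg (d : PySem.Dict Int Int) (inf : Int) (rc : List Int) :
    0 ≤ pvLineStep d inf rc := by
  have aux : ∀ (rc : List Int) (a : Int), 0 ≤ a →
      0 ≤ rc.foldl (fun s x => let j := d.getD x inf; if j > s then j else s) a := by
    intro rc
    induction rc with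
    | nil => intro a h; simpa using h
    | cons y ys ih =>
        intro a h
        rw [List.foldl_cons]
        refine ih _ ?_
        show 0 ≤ if d.getD y inf > a then d.getD y inf else a
        split <;> omega
  exact aux rc 0 le_rfl

theorem pvGridStep_nonneg (d : PySem.Dict Int Int) (inf : Int) (hinf : 0 ≤ inf)
    (g : List (List Int)) : 0 ≤ pvGridStep d inf g := by
  have aux : ∀ (g : List (List Int)) (a : Int), 0 ≤ a →
      0 ≤ g.foldl (fun m rc => let t := pvLineStep d inf rc; if t < m then t else m) a := by
    intro g
    induction g with
    | nil => intro a h; simpa using h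
    | cons y ys ih =>
        intro a h
        rw [List.foldl_cons]
        refine ih _ ?_
        show 0 ≤ if pvLineStep d inf y < a then pvLineStep d inf y else a
        have := pvLineStep_nonneg d inf y
        split <;> omega
  exact aux g inf hinf

-- the min-fold of pvGridStep
theorem pvGridStep_aux (d : PySem.Dict Int Int) (inf : Int) (g : List (List Int)) (a c : Int) :
    (g.foldl (fun m rc => let t := pvLineStep d inf rc; if t < m then t else m) a ≤ c) ↔
      (a ≤ c ∨ ∃ rc ∈ g, pvLineStep d inf rc ≤ c) := by
  induction g generalizing a with
  | nil => simp
  | cons y ys ih =>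
      simp only [List.foldl_cons, List.mem_cons]
      rw [ih]
      constructor
      · rintro (h1 | ⟨rc, hrc, h2⟩)
        · split at h1
          · exact Or.inr ⟨y, Or.inl rfl, h1⟩
          · exact Or.inl h1
        · exact Or.inr ⟨rc, Or.inr hrc, h2⟩
      · rintro (h1 | ⟨rc, rfl | hrc, h2⟩)
        · exact Or.inl (by split <;> omega)
        · exact Or.inl (by split <;> omega)
        · exact Or.inr ⟨rc, hrc, h2⟩

-- a line is fully marked after draw k iff its completion step is ≤ k
theorem pvLineDone_iff_step (numbers : List Int) (rc : List Int) (k : Nat)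
    (hk : k < numbers.length) :
    pvLineDone (numbers.take (k+1)) rc = true ↔
      pvLineStep (pvBuildIdx numbers) ((numbers.length : Int)) rc ≤ (k : Int) := by
  simp only [pvLineDone, pvLineStep]
  rw [pvLineStep_aux, List.all_eq_true]
  constructor
  · intro h
    refine ⟨by exact_mod_cast Nat.zero_le k, fun x hx => ?_⟩
    have h2 := h x hx
    rw [List.contains_eq_mem, decide_eq_true_eq,
      mem_take_iff_idxOf x numbers (k+1) (by omega)] at h2
    rw [pvBuildIdx_getD]
    exact_mod_cast Nat.lt_succ_iff.mp h2
  · rintro ⟨-, h⟩ x hx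
    have h2 := h x hx
    rw [pvBuildIdx_getD] at h2
    rw [List.contains_eq_mem, decide_eq_true_eq,
      mem_take_iff_idxOf x numbers (k+1) (by omega)]
    exact Nat.lt_succ_iff.mpr (by exact_mod_cast h2)

-- a grid has a fully marked line after draw k iff its grid step is ≤ k
theorem pvGridDone_iff_step (numbers : List Int) (g : List (List Int)) (k : Nat)
    (hk : k < numbers.length) :
    (g.any (fun rc => pvLineDone (numbers.take (k+1)) rc) = true) ↔
      pvGridStep (pvBuildIdx numbers) ((numbers.length : Int)) g ≤ (k : Int) := by
  simp only [pvGridStep]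
  rw [pvGridStep_aux, List.any_eq_true]
  constructor
  · rintro ⟨rc, hrc, hdone⟩
    exact Or.inr ⟨rc, hrc, (pvLineDone_iff_step numbers rc k hk).mp hdone⟩
  · rintro (hle | ⟨rc, hrc, hstep⟩)
    · exfalso
      have : (k : Int) < (numbers.length : Int) := by exact_mod_cast hk
      omega
    · exact ⟨rc, hrc, (pvLineDone_iff_step numbers rc k hk).mpr hstep⟩

-- A's main loop: no winner anywhere
theorem pvLoopA_none (grids : List (List (List Int))) (ns marked : List Int)
    (h : ∀ k, k < ns.length → pvScanA grids (marked ++ ns.take (k+1)) = none) :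
    pvLoopA grids marked ns = none := by
  induction ns generalizing marked with
  | nil => rfl
  | cons n ns ih =>
      have h0 := h 0 (by simp)
      simp only [List.take_succ_cons, List.take_zero] at h0
      simp only [pvLoopA, h0]
      exact ih (marked ++ [n]) (fun k hk => by
        have h2 := h (k+1) (by simp; omega)
        rw [List.take_succ_cons, ← List.singleton_append, ← List.append_assoc] at h2
        exact h2)

-- A's main loop: first winner at step j
theorem pvLoopA_hit (grids : List (List (List Int))) (ns : List Int) (j : Nat)
    (marked : List Int) (hj : j < ns.length) (g : List (List Int))
    (hnone : ∀ k, k < j → pvScanA grids (marked ++ ns.take (k+1)) = none)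
    (hsome : pvScanA grids (marked ++ ns.take (j+1)) = some g) :
    pvLoopA grids marked ns = some (ns[j], marked ++ ns.take (j+1), g) := by
  induction ns generalizing marked j with
  | nil => simp at hj
  | cons n ns ih =>
      cases j with
      | zero =>
          simp only [List.take_succ_cons, List.take_zero] at hsome
          simp [pvLoopA, hsome]
      | succ j =>
          have h0 := hnone 0 (Nat.succ_pos j)
          simp only [List.take_succ_cons, List.take_zero] at h0
          simp only [pvLoopA, h0]
          have hres := ih j (marked ++ [n]) (by simpa using Nat.lt_of_succ_lt_succ hj)
            (fun k hk => by
              have h2 := hnone (k+1) (Nat.succ_lt_succ hk)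
              rw [List.take_succ_cons, ← List.singleton_append, ← List.append_assoc] at h2
              exact h2)
            (by
              rw [List.take_succ_cons, ← List.singleton_append, ← List.append_assoc] at hsome
              exact hsome)
          have heq : marked ++ List.take (j+1+1) (n :: ns) = (marked ++ [n]) ++ List.take (j+1) ns := by
            rw [List.take_succ_cons, ← List.singleton_append, ← List.append_assoc]
          rw [hres, heq]
          simp

-- B's fold over grids: either no improvement, or it finds the min and the first grid attaining it
theorem pvBFold_char (d : PySem.Dict Int Int) (inf : Int) (gs : List (List (List Int)))
    (b : Int) (o : Option (List (List Int))) :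
    (gs.foldl (fun (acc : Int × Option (List (List Int))) g =>
        let t := pvGridStep d inf g
        if t < acc.1 then (t, some g) else acc) (b, o) = (b, o) ∧
      ∀ g ∈ gs, b ≤ pvGridStep d inf g) ∨
    (∃ best bg,
      gs.foldl (fun (acc : Int × Option (List (List Int))) g =>
        let t := pvGridStep d inf g
        if t < acc.1 then (t, some g) else acc) (b, o) = (best, some bg) ∧
      best < b ∧ (∀ g ∈ gs, best ≤ pvGridStep d inf g) ∧
      pvGridStep d inf bg = best ∧
      gs.find? (fun g => decide (pvGridStep d inf g ≤ best)) = some bg) := by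
  induction gs generalizing b o with
  | nil => exact Or.inl ⟨rfl, by simp⟩
  | cons g gs ih =>
      by_cases hlt : pvGridStep d inf g < b
      · have hstep : (let t := pvGridStep d inf g
            if t < (b, o).1 then (t, some g) else (b, o)) = (pvGridStep d inf g, some g) := by
          show (if pvGridStep d inf g < b then (pvGridStep d inf g, some g) else (b, o)) = _
          rw [if_pos hlt]
        rcases ih (pvGridStep d inf g) (some g) with ⟨heq, hall⟩ |
            ⟨best, bg, heq, hlt2, hall, hbg, hfind⟩
        · refine Or.inr ⟨pvGridStep d inf g, g, ?_, hlt, ?_, rfl, ?_⟩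
          · rw [List.foldl_cons, hstep, heq]
          · intro g' hg0
            rcases List.mem_cons.mp hg0 with rfl | hg'
            · exact le_refl _
            · exact hall g' hg'
          · exact List.find?_cons_of_pos (by simp)
        · refine Or.inr ⟨best, bg, ?_, by omega, ?_, hbg, ?_⟩
          · rw [List.foldl_cons, hstep, heq]
          · intro g' hg0
            rcases List.mem_cons.mp hg0 with rfl | hg'
            · omega
            · exact hall g' hg'
          · rw [List.find?_cons_of_neg (by simp; omega)]
            exact hfind
      · have hstep : (let t := pvGridStep d inf g
            if t < (b, o).1 then (t, some g) else (b, o)) = (b, o) := by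
          show (if pvGridStep d inf g < b then (pvGridStep d inf g, some g) else (b, o)) = _
          rw [if_neg hlt]
        rcases ih b o with ⟨heq, hall⟩ | ⟨best, bg, heq, hlt2, hall, hbg, hfind⟩
        · refine Or.inl ⟨?_, ?_⟩
          · rw [List.foldl_cons, hstep, heq]
          · intro g' hg0
            rcases List.mem_cons.mp hg0 with rfl | hg'
            · omega
            · exact hall g' hg'
        · refine Or.inr ⟨best, bg, ?_, hlt2, ?_, hbg, ?_⟩
          · rw [List.foldl_cons, hstep, heq]
          · intro g' hg0
            rcases List.mem_cons.mp hg0 with rfl | hg'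
            · omega
            · exact hall g' hg'
          · rw [List.find?_cons_of_neg (by simp; omega)]
            exact hfind

-- ===== VERDICT (by name: the statement is the Claim_ definition above) =====
theorem get_bingo_spec : Claim_equal_get_bingo := by
  intro grids numbers _dom
  show get_bingo grids numbers = get_bingo_alt grids numbers
  by_cases hne : numbers = []
  · subst hne; rfl
  · have hlen : 0 < numbers.length := List.length_pos_of_ne_nil hne
    have hEmp : numbers.isEmpty = false := by simp [hne]
    rcases pvBFold_char (pvBuildIdx numbers) ((numbers.length : Int)) grids
        ((numbers.length : Int)) none with
      ⟨heq, hall⟩ | ⟨best, bg, heq, hlt, hall, hbg, hfind⟩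
    · -- no line ever completes: both return none
      have hBF : pvBestFold (pvBuildIdx numbers) ((numbers.length : Int)) grids
          = (((numbers.length : Int)), none) := heq
      have hAlt : get_bingo_alt grids numbers = none := by
        simp only [get_bingo_alt, hEmp, Bool.false_eq_true, if_false, hBF]
        simp
      have hA : get_bingo grids numbers = none := by
        apply pvLoopA_none
        intro k hk
        rw [List.nil_append, pvScanA_eq_find?]
        refine List.find?_eq_none.mpr (fun g hg => ?_)
        intro hT
        have hno : ¬ pvGridStep (pvBuildIdx numbers) ((numbers.length : Int)) g ≤ (k : Int) := by
          have h1 := hall g hg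
          have h2 : (k : Int) < (numbers.length : Int) := by exact_mod_cast hk
          omega
        exact hno ((pvGridDone_iff_step numbers g k hk).mp hT)
      rw [hA, hAlt]
    · -- the first completing line: step best, first grid bg
      have hbest0 : 0 ≤ best := hbg ▸ pvGridStep_nonneg _ _ (by positivity) bg
      have hj : ((best.toNat : Nat) : Int) = best := Int.toNat_of_nonneg hbest0
      have hjlt : best.toNat < numbers.length := by omega
      have hpred : (fun (g : List (List Int)) =>
            g.any (fun rc => pvLineDone (numbers.take (best.toNat + 1)) rc))
          = (fun g => decide (pvGridStep (pvBuildIdx numbers) ((numbers.length : Int)) g ≤ best)) := by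
        funext g
        have hiff := pvGridDone_iff_step numbers g best.toNat hjlt
        rw [hj] at hiff
        by_cases hgb : pvGridStep (pvBuildIdx numbers) ((numbers.length : Int)) g ≤ best
        · rw [decide_eq_true hgb]; exact hiff.mpr hgb
        · rw [decide_eq_false hgb]
          exact Bool.eq_false_iff.mpr (fun hT => hgb (hiff.mp hT))
      have hA : get_bingo grids numbers =
          some (numbers[best.toNat]'hjlt, numbers.take (best.toNat + 1), bg) := by
        have hh := pvLoopA_hit grids numbers best.toNat [] hjlt bg
          (fun k hk => by
            rw [List.nil_append, pvScanA_eq_find?]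
            refine List.find?_eq_none.mpr (fun g hg => ?_)
            intro hT
            have hklt : k < numbers.length := by omega
            have hno : ¬ pvGridStep (pvBuildIdx numbers) ((numbers.length : Int)) g ≤ (k : Int) := by
              have h1 := hall g hg
              have h2 : (k : Int) < best := by omega
              omega
            exact hno ((pvGridDone_iff_step numbers g k hklt).mp hT))
          (by rw [List.nil_append, pvScanA_eq_find?, hpred]; exact hfind)
        simpa using hh
      have hBF : pvBestFold (pvBuildIdx numbers) ((numbers.length : Int)) grids
          = (best, some bg) := heq
      have hAlt : get_bingo_alt grids numbers =
          some (numbers[best.toNat]'hjlt, numbers.take (best.toNat + 1), bg) := by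
        simp only [get_bingo_alt, hEmp, Bool.false_eq_true, if_false, hBF]
        rw [if_neg (by omega)]
        have h1 : PySem.List.pyGet? numbers (((best.toNat : Nat)) : Int) = numbers[best.toNat]? :=
          PySem.List.pyGet?_natCast numbers best.toNat
        rw [hj] at h1
        rw [h1, List.getElem?_eq_getElem hjlt]
        rw [show PySem.List.slice numbers none (some (best + 1))
            = numbers.take (best.toNat + 1) from by
          rw [PySem.List.slice_to numbers (by omega)]
          congr 1
          omega]
      rw [hA, hAlt]
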